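-- pv_equiv track=rewrite | github.com/muyangye/Google_Foobar_Level3 | Queue To Do/solution.py | solution
-- ===== SOURCE A (Python) =====
-- def solution(start, length):
--     # Your code here
--     res = 0
--     count = start
--     for i in range(length):
--         for j in range(length-i):
--            res ^= count + j
--         count += length
--     return res
-- ===== SOURCE B (Python) =====
-- def _pxor(n):
--     # XOR of all integers from 0 to n (from n+1 to -1 when n < 0), closed form
--     return (n, 1, n + 1, 0)[n % 4]
--
--
-- def solution(start, length):
--     res = 0
--     for i in range(length):
--         lo = start + i * length
--         hi = lo + (length - i) - 1
--         res ^= _pxor(hi) ^ _pxor(lo - 1)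
--     return res
-- ===== Notes on version B (the rewrite author's own statement) =====
-- stated objective: faster
-- what changed: Replaced A's nested O(length^2) loop XOR-ing every integer with a single O(length) pass that XORs each row's range via the closed-form prefix XOR (n, 1, n+1, 0)[n % 4], valid for negative values too under Python's % semantics.
import Mathlib
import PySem

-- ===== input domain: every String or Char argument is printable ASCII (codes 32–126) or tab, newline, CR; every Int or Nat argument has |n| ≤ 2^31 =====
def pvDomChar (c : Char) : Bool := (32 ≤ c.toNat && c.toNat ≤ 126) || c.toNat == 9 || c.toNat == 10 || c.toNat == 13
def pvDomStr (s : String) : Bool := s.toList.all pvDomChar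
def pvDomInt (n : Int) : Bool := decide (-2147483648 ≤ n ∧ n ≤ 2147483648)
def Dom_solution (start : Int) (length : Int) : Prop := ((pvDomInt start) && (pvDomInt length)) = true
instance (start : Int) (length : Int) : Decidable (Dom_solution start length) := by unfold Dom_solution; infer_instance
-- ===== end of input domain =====

-- B replaces A's quadratic double loop by one pass using the closed-form prefix XOR (n,1,n+1,0)[n%4] per row.

-- ===== PORT A =====
def solution (start : Int) (length : Int) : Int :=
  ((PySem.List.pyRange 0 length 1).foldl
    (fun (s : Int × Int) i =>
      ((PySem.List.pyRange 0 (length - i) 1).foldl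
        (fun r j => PySem.Int.bxor r (s.2 + j)) s.1,
       s.2 + length))
    (0, start)).1

-- ===== PORT B =====
-- _pxor(n) = (n, 1, n + 1, 0)[n % 4]  (tuple indexing ported as the if-chain on n % 4)
def pxor (n : Int) : Int :=
  if PySem.Int.mod n 4 = 0 then n
  else if PySem.Int.mod n 4 = 1 then 1
  else if PySem.Int.mod n 4 = 2 then n + 1
  else 0

def solution_alt (start : Int) (length : Int) : Int :=
  (PySem.List.pyRange 0 length 1).foldl
    (fun res i =>
      let lo := start + i * length
      let hi := lo + (length - i) - 1
      PySem.Int.bxor res (PySem.Int.bxor (pxor hi) (pxor (lo - 1))))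
    0

-- ===== PRECONDITION & SPEC =====
def Spec_solution (start : Int) (length : Int) (out : Int) : Prop := out = solution_alt start length
instance (start : Int) (length : Int) (out : Int) : Decidable (Spec_solution start length out) := by unfold Spec_solution; infer_instance

-- ===== CLAIM (what is proved, stated in full; the proofs are below) =====
def Claim_equal_solution : Prop := ∀ (start : Int) (length : Int), Dom_solution start length → Spec_solution start length (solution start length)

-- ===== LEMMAS AND PROOFS =====

-- reduction of PySem.Int.bxor on the four Int sign shapes
theorem bxor_negSucc_negSucc (m n : Nat) :
    PySem.Int.bxor (Int.negSucc m) (Int.negSucc n) = ((m ^^^ n : Nat) : Int) := by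
  unfold PySem.Int.bxor
  rw [if_neg (by omega), if_neg (by omega),
    show (-Int.negSucc m - 1).toNat = m by omega,
    show (-Int.negSucc n - 1).toNat = n by omega]

theorem bxor_natCast_negSucc (m n : Nat) :
    PySem.Int.bxor (m : Int) (Int.negSucc n) = Int.negSucc (m ^^^ n) := by
  unfold PySem.Int.bxor
  rw [if_pos (by omega), if_neg (by omega)]
  have h1 : ((m : Int)).toNat = m := by omega
  have h2 : (-(Int.negSucc n) - 1).toNat = n := by omega
  rw [h1, h2, Int.negSucc_eq]
  ring

theorem bxor_negSucc_natCast (m n : Nat) :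
    PySem.Int.bxor (Int.negSucc m) (n : Int) = Int.negSucc (m ^^^ n) := by
  rw [PySem.Int.bxor_comm, bxor_natCast_negSucc, Nat.xor_comm]

theorem bxor_assoc (a b c : Int) :
    PySem.Int.bxor (PySem.Int.bxor a b) c = PySem.Int.bxor a (PySem.Int.bxor b c) := by
  rcases a with m | m <;> rcases b with n | n <;> rcases c with p | p <;>
    simp [Int.ofNat_eq_natCast, bxor_negSucc_negSucc, bxor_natCast_negSucc,
      bxor_negSucc_natCast, PySem.Int.bxor_natCast, Nat.xor_assoc]

-- the one genuinely bitwise fact: for even p, 1 XOR p = p + 1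
theorem one_xor_even (p : Nat) (h : p % 2 = 0) : 1 ^^^ p = p + 1 := by
  apply Nat.eq_of_testBit_eq
  intro i
  cases i with
  | zero =>
    have h1 : (p + 1) % 2 = 1 := by omega
    rw [Nat.testBit_xor, Nat.testBit_zero, Nat.testBit_zero, Nat.testBit_zero, h1]
    simp [h]
  | succ i =>
    have hd : (p + 1) / 2 = p / 2 := by omega
    rw [Nat.testBit_xor, Nat.testBit_succ, Nat.testBit_succ, Nat.testBit_succ, hd]
    simp

theorem one_xor_odd (p : Nat) (h : p % 2 = 1) : 1 ^^^ p = p - 1 := by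
  have h1 : p - 1 + 1 = p := by omega
  have h2 : 1 ^^^ (p - 1) = p := by rw [one_xor_even (p - 1) (by omega), h1]
  calc 1 ^^^ p = 1 ^^^ (1 ^^^ (p - 1)) := by rw [h2]
    _ = (1 ^^^ 1) ^^^ (p - 1) := by rw [Nat.xor_assoc]
    _ = p - 1 := by simp

theorem xor_even_succ (p : Nat) (h : p % 2 = 0) : p ^^^ (p + 1) = 1 := by
  calc p ^^^ (p + 1) = p ^^^ (1 ^^^ p) := by rw [one_xor_even p h]
    _ = p ^^^ (p ^^^ 1) := by rw [Nat.xor_comm 1 p]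
    _ = (p ^^^ p) ^^^ 1 := by rw [Nat.xor_assoc]
    _ = 1 := by simp

-- lifted to Int
theorem bxor_even_succ (a : Int) (h : a % 2 = 0) : PySem.Int.bxor a (a + 1) = 1 := by
  rcases a with m | m
  · rw [Int.ofNat_eq_natCast] at h
    have hm : ((m : Int)) + 1 = ((m + 1 : Nat) : Int) := by push_cast; ring
    rw [Int.ofNat_eq_natCast, hm, PySem.Int.bxor_natCast,
      xor_even_succ m (by omega)]
    norm_num
  · rw [Int.negSucc_eq] at h
    have hm1 : 1 ≤ m := by omega
    have hmo : m % 2 = 1 := by omega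
    have hstep : (Int.negSucc m) + 1 = Int.negSucc (m - 1) := by
      rw [Int.negSucc_eq, Int.negSucc_eq]; omega
    rw [hstep, bxor_negSucc_negSucc]
    have : m ^^^ (m - 1) = 1 := by
      rw [Nat.xor_comm]
      have := xor_even_succ (m - 1) (by omega)
      rwa [Nat.sub_add_cancel hm1] at this
    rw [this]; norm_num

theorem bxor_one_even (a : Int) (h : a % 2 = 0) : PySem.Int.bxor 1 a = a + 1 := by
  rcases a with m | m
  · rw [Int.ofNat_eq_natCast] at h
    have h1 : (1 : Int) = ((1 : Nat) : Int) := by norm_num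
    rw [Int.ofNat_eq_natCast, h1, PySem.Int.bxor_natCast, one_xor_even m (by omega)]
    push_cast; ring
  · rw [Int.negSucc_eq] at h
    have hmo : m % 2 = 1 := by omega
    have h1 : (1 : Int) = ((1 : Nat) : Int) := by norm_num
    rw [h1, bxor_natCast_negSucc, one_xor_odd m hmo, Int.negSucc_eq, Int.negSucc_eq]
    omega

-- the prefix-XOR closed form satisfies the defining recurrence
theorem pxor_succ (n : Int) : pxor (n + 1) = PySem.Int.bxor (pxor n) (n + 1) := by
  have h4 : (0 : Int) < 4 := by norm_num
  unfold pxor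
  rw [PySem.Int.mod_eq_emod_of_pos h4, PySem.Int.mod_eq_emod_of_pos h4]
  have hcase : n % 4 = 0 ∨ n % 4 = 1 ∨ n % 4 = 2 ∨ n % 4 = 3 := by omega
  rcases hcase with h | h | h | h
  · rw [if_neg (by omega), if_pos (by omega), if_pos (by omega),
      bxor_even_succ n (by omega)]
  · rw [if_neg (by omega), if_neg (by omega), if_pos (by omega),
      if_neg (by omega), if_pos (by omega), bxor_one_even (n + 1) (by omega)]
  · rw [if_neg (by omega), if_neg (by omega), if_neg (by omega),
      if_neg (by omega), if_neg (by omega), if_pos (by omega), PySem.Int.bxor_self]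
  · rw [if_pos (by omega), if_neg (by omega), if_neg (by omega), if_neg (by omega),
      PySem.Int.bxor_comm, PySem.Int.bxor_zero]

theorem bxor_rot (r P Q w : Int) :
    PySem.Int.bxor (PySem.Int.bxor r (PySem.Int.bxor P Q)) w
      = PySem.Int.bxor r (PySem.Int.bxor (PySem.Int.bxor P w) Q) := by
  rw [bxor_assoc, bxor_assoc, bxor_assoc, PySem.Int.bxor_comm Q w]

-- A's inner loop equals the closed-form row XOR
theorem inner_loop (c : Int) (m : Nat) (r : Int) :
    (PySem.List.pyRange 0 m 1).foldl (fun r j => PySem.Int.bxor r (c + j)) r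
      = PySem.Int.bxor r (PySem.Int.bxor (pxor (c + m - 1)) (pxor (c - 1))) := by
  induction m with
  | zero => simp [PySem.List.pyRange_one_eq_nil, PySem.Int.bxor_self, PySem.Int.bxor_zero]
  | succ m ih =>
    have hc : ((m + 1 : Nat) : Int) = (m : Int) + 1 := by push_cast; ring
    rw [hc, PySem.List.pyRange_one_succ_right (by positivity), List.foldl_append, ih]
    simp only [List.foldl_cons, List.foldl_nil]
    have h1 : c + ((m : Int) + 1) - 1 = (c + (m : Int) - 1) + 1 := by ring
    rw [h1, pxor_succ (c + (m : Int) - 1)]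
    have h2 : c + (m : Int) - 1 + 1 = c + (m : Int) := by ring
    rw [h2, bxor_rot]

-- the outer loops agree step by step; A's count is start + k * length
theorem outer_loop (start length : Int) (k : Nat) (hk : (k : Int) ≤ length) :
    (PySem.List.pyRange 0 k 1).foldl
      (fun (s : Int × Int) i =>
        ((PySem.List.pyRange 0 (length - i) 1).foldl
          (fun r j => PySem.Int.bxor r (s.2 + j)) s.1,
         s.2 + length))
      (0, start)
    = ((PySem.List.pyRange 0 k 1).foldl
        (fun res i =>
          let lo := start + i * length
          let hi := lo + (length - i) - 1
          PySem.Int.bxor res (PySem.Int.bxor (pxor hi) (pxor (lo - 1))))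
        0,
       start + k * length) := by
  induction k with
  | zero => simp [PySem.List.pyRange_one_eq_nil]
  | succ k ih =>
    have hk' : (k : Int) ≤ length := by push_cast at hk ⊢; omega
    have hc : ((k + 1 : Nat) : Int) = (k : Int) + 1 := by push_cast; ring
    rw [hc, PySem.List.pyRange_one_succ_right (by positivity), List.foldl_append,
      List.foldl_append, ih hk']
    simp only [List.foldl_cons, List.foldl_nil]
    have hm : length - (k : Int) = (((length - (k : Int)).toNat : Nat) : Int) := by
      push_cast at hk ⊢; omega
    rw [Prod.mk.injEq]
    constructor
    · rw [hm, inner_loop (start + (k : Int) * length) (length - (k : Int)).toNat, ← hm]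
    · ring

-- ===== VERDICT (by name: the statement is the Claim_ definition above) =====
theorem solution_spec : Claim_equal_solution := by
  intro start length _
  unfold Spec_solution solution solution_alt
  by_cases h : 0 < length
  · have hl : length = ((length.toNat : Nat) : Int) := by omega
    have ho := outer_loop start length length.toNat (by omega)
    rw [← hl] at ho
    rw [ho]
  · rw [PySem.List.pyRange_one_eq_nil (by omega)]
    simp
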